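-- pv_equiv track=rewrite | github.com/OpenMDAO/OpenMDAO | openmdao/utils/array_utils.py | take_nth
-- ===== SOURCE A (Python) =====
-- def take_nth(rank, size, seq):
--     """
--     Iterate returning every nth value.
--
--     Return an iterator over the sequence that returns every
--     nth element of seq based on the given rank within a group of
--     the given size.  For example, if size = 2, a rank of 0 returns
--     even indexed elements and a rank of 1 returns odd indexed elements.
--
--     Parameters
--     ----------
--     rank : int
--         MPI rank of this process.
--     size : int
--         Size of the array we're taking nth entries from.
--     seq : iter
--         Iterator containing the values being returned.
--
--     Yields
--     ------
--     generator
--     """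
--     assert rank < size
--     it = iter(seq)
--     while True:
--         for proc in range(size):
--             if rank == proc:
--                 try:
--                     yield next(it)
--                 except StopIteration:
--                     return
--             else:
--                 try:
--                     next(it)
--                 except StopIteration:
--                     return
-- ===== SOURCE B (Python) =====
-- def take_nth(rank, size, seq):
--     """Every size-th element starting at index rank, as one list comprehension."""
--     assert rank < size
--     return [x for i, x in enumerate(seq) if i % size == rank]
-- ===== Notes on version B (the rewrite author's own statement) =====
-- stated objective: idiomatic
-- what changed: Replaced the infinite while-loop with a nested per-slot range(size) walk, yield/skip branching and StopIteration handling by a single list comprehension over enumerate(seq) keeping the elements whose index satisfies i % size == rank.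
import Mathlib
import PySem

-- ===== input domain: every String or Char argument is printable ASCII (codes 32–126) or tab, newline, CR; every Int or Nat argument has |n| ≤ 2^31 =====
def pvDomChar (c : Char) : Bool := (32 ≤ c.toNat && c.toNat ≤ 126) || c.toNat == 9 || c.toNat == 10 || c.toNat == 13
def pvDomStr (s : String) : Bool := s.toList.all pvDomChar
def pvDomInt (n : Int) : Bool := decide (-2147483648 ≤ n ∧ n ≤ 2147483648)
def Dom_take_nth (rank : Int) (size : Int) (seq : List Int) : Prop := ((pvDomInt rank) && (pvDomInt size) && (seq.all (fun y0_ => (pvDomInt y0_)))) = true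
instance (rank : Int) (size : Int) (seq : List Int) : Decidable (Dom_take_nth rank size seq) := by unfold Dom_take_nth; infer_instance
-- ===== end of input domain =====

-- B replaces A's infinite while-loop with per-slot range(size) yield/skip branching
-- by one list comprehension over enumerate keeping indices with i % size == rank (idiomatic).

-- ===== PORT A =====
-- A's while True / for proc in range(size) loop: one element of the iterator is
-- consumed per proc step, proc cycling 0,1,…,size-1,0,…; yield when rank == proc,
-- return on StopIteration (= end of list). Faithful for size ≥ 1 (Pre_); for
-- size ≤ 0 the Python loops forever, excluded by Pre_.
def takeA_loop (rank : Int) (size : Int) (proc : Int) : List Int → List Int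
  | [] => []
  | x :: rest =>
      let proc' := if proc + 1 = size then 0 else proc + 1
      if rank = proc then x :: takeA_loop rank size proc' rest
      else takeA_loop rank size proc' rest

def take_nth (rank : Int) (size : Int) (seq : List Int) : List Int :=
  -- assert rank < size: AssertionError (excluded by Pre_) modelled as []
  if rank < size then takeA_loop rank size 0 seq else []

-- ===== PORT B =====
-- B: [x for i, x in enumerate(seq) if i % size == rank]
def take_nth_alt (rank : Int) (size : Int) (seq : List Int) : List Int :=
  if rank < size then
    ((PySem.List.enumerate seq).filter (fun p => PySem.Int.mod p.1 size == rank)).map Prod.snd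
  else []

-- ===== PRECONDITION & SPEC =====
-- Pre_ excludes size ≤ 0 (A never returns: infinite loop) and rank ≥ size (AssertionError).
def Pre_take_nth (rank : Int) (size : Int) (seq : List Int) : Prop := 1 ≤ size ∧ rank < size
instance (rank : Int) (size : Int) (seq : List Int) : Decidable (Pre_take_nth rank size seq) := by unfold Pre_take_nth; infer_instance
def pvWitness_take_nth : Int × Int × List Int := (1, 3, [10, 20, 30, 40, 50, 60, 70])

def Spec_take_nth (rank : Int) (size : Int) (seq : List Int) (out : List Int) : Prop := out = take_nth_alt rank size seq
instance (rank : Int) (size : Int) (seq : List Int) (out : List Int) : Decidable (Spec_take_nth rank size seq out) := by unfold Spec_take_nth; infer_instance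

-- ===== CLAIM (what is proved, stated in full; the proofs are below) =====
def Claim_equal_take_nth : Prop := ∀ (rank : Int) (size : Int) (seq : List Int), Dom_take_nth rank size seq → Pre_take_nth rank size seq → Spec_take_nth rank size seq (take_nth rank size seq)

-- ===== LEMMAS AND PROOFS =====

lemma loop_eq_filter (rank size : Int) (hs : 1 ≤ size) :
    ∀ (l : List Int) (proc i : Int), 0 ≤ proc → proc < size →
      PySem.Int.mod i size = proc →
      takeA_loop rank size proc l
        = ((PySem.List.enumerate l i).filter (fun p => PySem.Int.mod p.1 size == rank)).map Prod.snd := by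
  intro l
  induction l with
  | nil => intro proc i _ _ _; simp [takeA_loop, PySem.List.enumerate_nil]
  | cons x rest ih =>
      intro proc i h0 hlt hmod
      have hpos : (0:Int) < size := by omega
      have hm : i % size = proc := by
        rw [← PySem.Int.mod_eq_emod_of_pos hpos]; exact hmod
      have hp : proc % size = proc := Int.emod_eq_of_lt h0 hlt
      have key : (i + 1) % size = (proc + 1) % size := by
        conv_lhs => rw [Int.add_emod, hm]
        conv_rhs => rw [Int.add_emod, hp]
      have hmod' : PySem.Int.mod (i + 1) size = (if proc + 1 = size then 0 else proc + 1) := by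
        rw [PySem.Int.mod_eq_emod_of_pos hpos, key]
        by_cases hc : proc + 1 = size
        · rw [if_pos hc, hc, Int.emod_self]
        · rw [if_neg hc, Int.emod_eq_of_lt (by omega) (by omega)]
      have h0' : 0 ≤ (if proc + 1 = size then 0 else proc + 1) := by split <;> omega
      have hlt' : (if proc + 1 = size then 0 else proc + 1) < size := by split <;> omega
      rw [PySem.List.enumerate_cons]
      simp only [takeA_loop, List.filter_cons, hmod]
      by_cases h : rank = proc
      · subst h; simp [ih _ _ h0' hlt' hmod']
      · have hne : proc ≠ rank := fun e => h e.symm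
        simp [h, hne, ih _ _ h0' hlt' hmod']

-- ===== VERDICT (by name: the statement is the Claim_ definition above) =====
theorem take_nth_spec : Claim_equal_take_nth := by
  intro rank size seq _ hpre
  have hpos : (0:Int) < size := by have := hpre.1; omega
  have hm0 : PySem.Int.mod 0 size = 0 := by
    rw [PySem.Int.mod_eq_emod_of_pos hpos]; exact Int.zero_emod size
  unfold Spec_take_nth take_nth take_nth_alt
  rw [if_pos hpre.2, if_pos hpre.2]
  exact loop_eq_filter rank size hpre.1 seq 0 0 le_rfl hpos hm0
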